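-- pv_equiv track=rewrite | github.com/szunovy/Hyperskill-Tasks | Tetris/game.py | check_complete_col
-- ===== SOURCE A (Python) =====
-- def check_complete_col(matrix):
--     n_rows = len(matrix)
--     n_cols = len(matrix[0])
--     for i in range(n_cols):
--         single_col = [elem[i] for elem in matrix]
--         if single_col.count('0') == n_rows:
--             return True
--     return False
-- ===== SOURCE B (Python) =====
-- def check_complete_col(matrix):
--     n_cols = len(matrix[0])
--     alive = [True] * n_cols
--     for row in matrix:
--         for i in range(n_cols):
--             if row[i] != '0':
--                 alive[i] = False
--     return any(alive)
-- ===== Notes on version B (the rewrite author's own statement) =====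
-- stated objective: alternative
-- what changed: Instead of building each column as a fresh list and counting '0' in it column by column, B keeps a per-column boolean 'alive' array maintained in a single row-major pass and returns any(alive).
-- outside the precondition, e.g. on check_complete_col([['0', '1'], ['0']]): A returns True, B raises IndexError
import Mathlib
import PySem

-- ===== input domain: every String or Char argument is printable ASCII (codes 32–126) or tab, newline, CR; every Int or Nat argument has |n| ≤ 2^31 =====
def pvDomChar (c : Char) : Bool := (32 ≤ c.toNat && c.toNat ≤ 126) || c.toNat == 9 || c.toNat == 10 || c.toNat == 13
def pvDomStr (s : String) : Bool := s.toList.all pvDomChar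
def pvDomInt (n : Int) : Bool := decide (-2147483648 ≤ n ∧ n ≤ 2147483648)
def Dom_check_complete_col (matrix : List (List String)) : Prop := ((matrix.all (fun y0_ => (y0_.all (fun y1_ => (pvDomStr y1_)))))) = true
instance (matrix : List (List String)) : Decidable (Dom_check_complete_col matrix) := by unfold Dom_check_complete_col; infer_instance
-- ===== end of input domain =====

-- B replaces A's column-by-column build-and-count with a per-column boolean 'alive' array
-- maintained in a single row-major pass (alternative decomposition, same cost).

-- ===== PORT A =====
-- the 'for i in range(n_cols): … return True … / return False' loop of A
def check_complete_col_loopA (matrix : List (List String)) (n_rows : Int) : List Int → Bool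
  | [] => false
  | i :: rest =>
    -- single_col = [elem[i] for elem in matrix]; pyGetD is exact under Pre_ (rows long enough)
    let single_col := matrix.map (fun elem => PySem.List.pyGetD elem i "")
    if ((PySem.List.count single_col "0" : Int) = n_rows) then true
    else check_complete_col_loopA matrix n_rows rest

def check_complete_col (matrix : List (List String)) : Bool :=
  let n_rows : Int := matrix.length
  let n_cols : Int := ((PySem.List.pyGetD matrix 0 []).length : Int)  -- len(matrix[0]); exact under Pre_
  check_complete_col_loopA matrix n_rows (PySem.List.pyRange 0 n_cols 1)

-- ===== PORT B =====
def check_complete_col_alt (matrix : List (List String)) : Bool :=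
  let n_cols : Int := ((PySem.List.pyGetD matrix 0 []).length : Int)  -- len(matrix[0]); exact under Pre_
  let alive0 : List Bool := List.replicate n_cols.toNat true
  let alive := matrix.foldl (fun al row =>
      (PySem.List.pyRange 0 n_cols 1).foldl (fun al i =>
        if PySem.List.pyGetD row i "" ≠ "0" then PySem.List.pySetD al i false else al) al) alive0
  alive.any id

-- ===== PRECONDITION & SPEC =====
-- Pre_ excludes the empty matrix (IndexError in both) and ragged matrices with a row shorter
-- than the first row, where A may return True before reaching the short row while B raises.
def Pre_check_complete_col (matrix : List (List String)) : Prop :=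
  matrix ≠ [] ∧ ∀ row ∈ matrix, (matrix.headD []).length ≤ row.length
instance (matrix : List (List String)) : Decidable (Pre_check_complete_col matrix) := by
  unfold Pre_check_complete_col; infer_instance

def pvWitness_check_complete_col : List (List String) := [["0", "1"], ["0", "2"]]

def Spec_check_complete_col (matrix : List (List String)) (out : Bool) : Prop :=
  out = check_complete_col_alt matrix
instance (matrix : List (List String)) (out : Bool) : Decidable (Spec_check_complete_col matrix out) := by
  unfold Spec_check_complete_col; infer_instance

-- ===== CLAIM (what is proved, stated in full; the proofs are below) =====
def Claim_equal_check_complete_col : Prop := ∀ (matrix : List (List String)), Dom_check_complete_col matrix → Pre_check_complete_col matrix → Spec_check_complete_col matrix (check_complete_col matrix)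

-- ===== LEMMAS AND PROOFS =====

-- the per-column predicate both programs decide
def pvColAll (matrix : List (List String)) (i : Int) : Bool :=
  matrix.all (fun row => PySem.List.pyGetD row i "" == "0")

lemma pv_count_key (matrix : List (List String)) (i : Int) :
    (decide ((PySem.List.count (matrix.map (fun elem => PySem.List.pyGetD elem i "")) "0" : Int)
      = (matrix.length : Int))) = pvColAll matrix i := by
  have h1 : ((PySem.List.count (matrix.map (fun elem => PySem.List.pyGetD elem i "")) "0" : Int)
      = (matrix.length : Int)) ↔ ∀ row ∈ matrix, PySem.List.pyGetD row i "" = "0" := by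
    rw [PySem.List.count_eq, Nat.cast_inj,
        show matrix.length = (matrix.map (fun elem => PySem.List.pyGetD elem i "")).length from
          (List.length_map _).symm,
        List.count_eq_length]
    constructor
    · intro h row hrow
      exact (h _ (List.mem_map_of_mem hrow)).symm
    · intro h b hb
      obtain ⟨row, hrow, rfl⟩ := List.mem_map.1 hb
      exact (h row hrow).symm
  cases h2 : pvColAll matrix i with
  | true =>
      apply decide_eq_true
      exact h1.mpr (fun row hrow => by
        have := List.all_eq_true.mp h2 row hrow
        simpa using this)
  | false =>
      apply decide_eq_false
      intro hc
      have hall : pvColAll matrix i = true :=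
        List.all_eq_true.mpr (fun row hrow => by simpa using h1.mp hc row hrow)
      rw [h2] at hall
      exact Bool.false_ne_true hall

lemma pv_loopA_eq (matrix : List (List String)) :
    ∀ l : List Int, check_complete_col_loopA matrix (matrix.length : Int) l
      = l.any (pvColAll matrix) := by
  intro l
  induction l with
  | nil => simp [check_complete_col_loopA]
  | cons i rest ih =>
      rw [check_complete_col_loopA, List.any_cons, ← ih, ← pv_count_key matrix i]
      by_cases h : ((PySem.List.count (matrix.map (fun elem => PySem.List.pyGetD elem i "")) "0" : Int)
          = (matrix.length : Int)) <;> simp [h]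

-- the inner loop of B, over List.range (after pyRange_zero_nat / foldl_map)
def pvInner (row : List String) (n : Nat) (al : List Bool) : List Bool :=
  (List.range n).foldl (fun al (k : Nat) =>
    if PySem.List.pyGetD row (k : Int) "" ≠ "0" then PySem.List.pySetD al (k : Int) false else al) al

lemma pvInner_succ (row : List String) (n : Nat) (al : List Bool) :
    pvInner row (n + 1) al
      = if PySem.List.pyGetD row (n : Int) "" ≠ "0"
        then PySem.List.pySetD (pvInner row n al) (n : Int) false
        else pvInner row n al := by
  simp only [pvInner, List.range_succ, List.foldl_append, List.foldl_cons, List.foldl_nil]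

lemma pv_inner_length (row : List String) : ∀ (n : Nat) (al : List Bool),
    (pvInner row n al).length = al.length := by
  intro n
  induction n with
  | zero => simp [pvInner]
  | succ n ih =>
      intro al
      rw [pvInner_succ]
      split <;> simp [ih]

lemma pv_inner_getElem? (row : List String) : ∀ (n : Nat) (al : List Bool) (j : Nat),
    (pvInner row n al)[j]?
      = if j < n then al[j]?.map (fun b => b && (PySem.List.pyGetD row (j : Int) "" == "0"))
        else al[j]? := by
  intro n
  induction n with
  | zero => simp [pvInner]
  | succ n ih =>
      intro al j
      have hlen : (pvInner row n al).length = al.length := pv_inner_length row n al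
      rw [pvInner_succ]
      by_cases hc : PySem.List.pyGetD row (n : Int) "" ≠ "0"
      · rw [if_pos hc, PySem.List.pySetD_natCast, List.getElem?_set]
        by_cases hj : n = j
        · subst hj
          rw [if_pos rfl, hlen]
          by_cases hin : n < al.length
          · rw [if_pos hin, List.getElem?_eq_getElem hin, if_pos (by omega : n < n + 1)]
            simp
            intro _
            simpa using hc
          · rw [if_neg hin, if_pos (by omega : n < n + 1),
                List.getElem?_eq_none (by omega : al.length ≤ n)]
            rfl
        · rw [if_neg hj, ih al j]
          by_cases hjn : j < n
          · rw [if_pos hjn, if_pos (by omega : j < n + 1)]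
          · rw [if_neg hjn, if_neg (by omega : ¬ j < n + 1)]
      · rw [if_neg hc, ih al j]
        have hc' : (PySem.List.pyGetD row (n : Int) "" == "0") = true := by
          simpa using hc
        by_cases hj : j = n
        · subst hj
          rw [if_neg (by omega : ¬ j < j), if_pos (by omega : j < j + 1), hc']
          cases al[j]? <;> simp
        · by_cases hjn : j < n
          · rw [if_pos hjn, if_pos (by omega : j < n + 1)]
          · rw [if_neg hjn, if_neg (by omega : ¬ j < n + 1)]

-- the outer fold of B, over rows
def pvOuter (rows : List (List String)) (n : Nat) (al : List Bool) : List Bool :=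
  rows.foldl (fun al row => pvInner row n al) al

lemma pv_outer_getElem? (n : Nat) :
    ∀ (rows : List (List String)) (al : List Bool) (j : Nat), j < n →
    (pvOuter rows n al)[j]?
      = al[j]?.map (fun b => b && rows.all (fun row => PySem.List.pyGetD row (j : Int) "" == "0")) := by
  intro rows
  induction rows with
  | nil =>
      intro al j hj
      simp [pvOuter, Option.map_id']
  | cons row rows ih =>
      intro al j hj
      have h1 : (pvOuter (row :: rows) n al) = pvOuter rows n (pvInner row n al) := by
        simp [pvOuter]
      rw [h1, ih _ j hj, pv_inner_getElem? row n al j, if_pos hj]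
      cases al[j]? with
      | none => simp
      | some b => simp [Bool.and_assoc]

lemma pv_outer_length (n : Nat) : ∀ (rows : List (List String)) (al : List Bool),
    (pvOuter rows n al).length = al.length := by
  intro rows
  induction rows with
  | nil => simp [pvOuter]
  | cons row rows ih =>
      intro al
      have h1 : (pvOuter (row :: rows) n al) = pvOuter rows n (pvInner row n al) := by
        simp [pvOuter]
      rw [h1, ih, pv_inner_length]

lemma pv_alive_eq (matrix : List (List String)) (n : Nat) :
    pvOuter matrix n (List.replicate n true)
      = (List.range n).map (fun (j : Nat) => matrix.all (fun row => PySem.List.pyGetD row (j : Int) "" == "0")) := by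
  apply List.ext_getElem?
  intro j
  by_cases hj : j < n
  · rw [pv_outer_getElem? n matrix _ j hj, List.getElem?_replicate, if_pos hj]
    simp [List.getElem?_map, List.getElem?_range hj]
  · have h1 : (pvOuter matrix n (List.replicate n true)).length ≤ j := by
      rw [pv_outer_length]; simp; omega
    have h2 : ((List.range n).map (fun (j : Nat) => matrix.all (fun row => PySem.List.pyGetD row (j : Int) "" == "0"))).length ≤ j := by
      simp; omega
    rw [List.getElem?_eq_none h1, List.getElem?_eq_none h2]

lemma pv_alt_eq_any (matrix : List (List String)) :
    check_complete_col_alt matrix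
      = (List.range ((PySem.List.pyGetD matrix 0 []).length)).any
          (fun (k : Nat) => pvColAll matrix (k : Int)) := by
  simp only [check_complete_col_alt]
  set n : Nat := (PySem.List.pyGetD matrix 0 []).length with hn
  simp only [Int.toNat_natCast, PySem.List.pyRange_zero_nat, List.foldl_map]
  have h1 : matrix.foldl (fun al row =>
      (List.range n).foldl (fun al (k : Nat) =>
        if PySem.List.pyGetD row (k : Int) "" ≠ "0" then PySem.List.pySetD al (k : Int) false else al) al)
      (List.replicate n true) = pvOuter matrix n (List.replicate n true) := by
    simp [pvOuter, pvInner]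
  rw [h1, pv_alive_eq matrix n, List.any_map]
  simp [pvColAll]

lemma pv_a_eq_any (matrix : List (List String)) :
    check_complete_col matrix
      = (List.range ((PySem.List.pyGetD matrix 0 []).length)).any
          (fun (k : Nat) => pvColAll matrix (k : Int)) := by
  simp only [check_complete_col]
  rw [PySem.List.pyRange_zero_nat, pv_loopA_eq, List.any_map]
  simp [Function.comp_def]

-- ===== VERDICT (by name: the statement is the Claim_ definition above) =====
theorem check_complete_col_spec : Claim_equal_check_complete_col := by
  intro matrix _ _
  unfold Spec_check_complete_col
  rw [pv_a_eq_any, pv_alt_eq_any]
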